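-- pv_equiv track=rewrite | github.com/yannickloth/W33-Theory | tools/test_c2_s6_on_double_sixes.py | closure_generated_by
-- ===== SOURCE A (Python) =====
-- from collections import deque
--
-- def closure_generated_by(gens, degree):
--     identity = tuple(range(degree))
--     closure = {identity}
--     q = deque([identity])
--     while q:
--         h = q.popleft()
--         for g in gens:
--             comp = tuple(g[i] for i in h)
--             if comp not in closure:
--                 closure.add(comp)
--                 q.append(comp)
--     return closure
-- ===== SOURCE B (Python) =====
-- def closure_generated_by(gens, degree):
--     identity = tuple(range(degree))
--     closure = {identity}
--     changed = True
--     while changed: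
--         changed = False
--         for h in list(closure):
--             for g in gens:
--                 comp = tuple(g[i] for i in h)
--                 if comp not in closure:
--                     closure.add(comp)
--                     changed = True
--     return closure
-- ===== Notes on version B (the rewrite author's own statement) =====
-- stated objective: alternative
-- what changed: Replaced the BFS worklist queue with a fixed-point loop: repeatedly sweep the whole current closure, composing every member with every generator and adding new elements, until a full sweep adds nothing; no queue is maintained.
-- outside the precondition, e.g. on closure_generated_by([(1, 2, 0)], 2): A returns {(0, 1), (1, 2), (2, 0)}, B returns {(0, 1), (1, 2), (2, 0)}
import Mathlib
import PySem

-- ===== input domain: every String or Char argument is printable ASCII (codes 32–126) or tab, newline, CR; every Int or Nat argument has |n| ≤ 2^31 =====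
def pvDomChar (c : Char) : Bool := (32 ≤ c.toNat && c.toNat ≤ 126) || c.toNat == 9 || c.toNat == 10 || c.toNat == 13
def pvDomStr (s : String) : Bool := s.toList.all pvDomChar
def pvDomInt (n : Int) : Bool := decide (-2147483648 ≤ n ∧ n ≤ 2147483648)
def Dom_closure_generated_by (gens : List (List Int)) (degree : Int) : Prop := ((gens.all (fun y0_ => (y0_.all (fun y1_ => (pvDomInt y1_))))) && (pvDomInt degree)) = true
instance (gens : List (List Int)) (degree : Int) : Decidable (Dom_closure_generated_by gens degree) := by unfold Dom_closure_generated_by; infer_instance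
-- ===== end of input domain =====

-- B replaces A's BFS queue by a queue-free fixed-point loop (sweep the whole closure until a
-- sweep adds nothing); same closure set, no speed claim.

-- ===== PORT A =====
-- comp = tuple(g[i] for i in h); total pyGetD form, exact under Pre_ (indices in range there)
def pvCompA (g h : List Int) : List Int := h.map (fun i => PySem.List.pyGetD g i 0)

-- the BFS loop: pop h, fold the for-g body over (closure, q); fuel is only a termination
-- guard (the closure can never exceed |0 :: identity ++ all entries of gens| ^ degree elements)
def pvLoopA (gens : List (List Int)) : Nat → List (List Int) → List (List Int) → List (List Int)
  | 0, closure, _ => closure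
  | _ + 1, closure, [] => closure
  | fuel + 1, closure, h :: q =>
      let st := gens.foldl
        (fun (st : List (List Int) × List (List Int)) g =>
          let comp := pvCompA g h
          if PySem.Set.contains st.1 comp then st
          else (PySem.Set.add st.1 comp, st.2 ++ [comp]))
        (closure, q)
      pvLoopA gens fuel st.1 st.2

def closure_generated_by (gens : List (List Int)) (degree : Int) : List (List Int) :=
  let identity := PySem.List.pyRange 0 degree 1
  let fuel := (0 :: identity ++ gens.flatMap id).length ^ degree.toNat + 1
  pvLoopA gens fuel (PySem.Set.ofList [identity]) [identity]

-- ===== PORT B =====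
def pvCompB (g h : List Int) : List Int := h.map (fun i => PySem.List.pyGetD g i 0)

-- one sweep: for h in list(closure): for g in gens: closure.add(comp)
def pvPassB (gens : List (List Int)) (closure : PySem.Set (List Int)) : PySem.Set (List Int) :=
  closure.foldl (fun acc h => gens.foldl (fun acc g => PySem.Set.add acc (pvCompB g h)) acc) closure

-- while changed:  changed ↔ the sweep enlarged the closure; fuel is only a termination guard
def pvFixB (gens : List (List Int)) : Nat → PySem.Set (List Int) → PySem.Set (List Int)
  | 0, closure => closure
  | fuel + 1, closure =>
      let next := pvPassB gens closure
      if next = closure then closure else pvFixB gens fuel next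

def closure_generated_by_alt (gens : List (List Int)) (degree : Int) : List (List Int) :=
  let identity := PySem.List.pyRange 0 degree 1
  let fuel := (0 :: identity ++ gens.flatMap id).length ^ degree.toNat + 1
  pvFixB gens fuel (PySem.Set.ofList [identity])

-- ===== PRECONDITION & SPEC =====
-- Pre_ excludes the inputs where tuple(g[i] for i in h) raises IndexError (a generator shorter
-- than degree, or an entry escaping [-degree, degree) that gets used as an index).  It also
-- excludes some inputs on which A happens to return — out-of-band entries that are never
-- reached as indices, or overlong generators — where both programs still agree (see cites).
def Pre_closure_generated_by (gens : List (List Int)) (degree : Int) : Prop :=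
  degree ≤ 0 ∨ gens = [] ∨
    ∀ g ∈ gens, degree ≤ (g.length : Int) ∧ ∀ x ∈ g, -degree ≤ x ∧ x < degree
instance (gens : List (List Int)) (degree : Int) : Decidable (Pre_closure_generated_by gens degree) := by unfold Pre_closure_generated_by; infer_instance

def pvWitness_closure_generated_by : List (List Int) × Int := ([[1, 0], [0, 1]], 2)

def Spec_closure_generated_by (gens : List (List Int)) (degree : Int) (out : List (List Int)) : Prop := out = closure_generated_by_alt gens degree
instance (gens : List (List Int)) (degree : Int) (out : List (List Int)) : Decidable (Spec_closure_generated_by gens degree out) := by unfold Spec_closure_generated_by; infer_instance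

-- ===== CLAIM (what is proved, stated in full; the proofs are below) =====
def Claim_equal_closure_generated_by : Prop := ∀ (gens : List (List Int)) (degree : Int), Dom_closure_generated_by gens degree → Pre_closure_generated_by gens degree → Spec_closure_generated_by gens degree (closure_generated_by gens degree)

-- ===== LEMMAS AND PROOFS =====

-- the shared alphabet: every entry of every closure element lies in it
def pvSigma (gens : List (List Int)) (degree : Int) : List Int :=
  0 :: PySem.List.pyRange 0 degree 1 ++ gens.flatMap id

def pvBound (gens : List (List Int)) (degree : Int) : Nat :=
  (pvSigma gens degree).length ^ degree.toNat

def pvGood (gens : List (List Int)) (degree : Int) (h : List Int) : Prop :=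
  h.length = degree.toNat ∧ ∀ v ∈ h, v ∈ pvSigma gens degree

-- processing one element h against a list of generators
def pvProc (l : List (List Int)) (c : List (List Int)) (h : List Int) : List (List Int) :=
  l.foldl (fun a g => PySem.Set.add a (pvCompA g h)) c

-- processing a snapshot list of elements
def pvProcs (gens : List (List Int)) (c : List (List Int)) (hs : List (List Int)) : List (List Int) :=
  hs.foldl (pvProc gens) c

theorem pvProc_nil (c : List (List Int)) (h : List Int) : pvProc [] c h = c := rfl
theorem pvProc_cons (g : List Int) (gs : List (List Int)) (c : List (List Int)) (h : List Int) :
    pvProc (g :: gs) c h = pvProc gs (PySem.Set.add c (pvCompA g h)) h := rfl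
theorem pvProcs_nil (gens c : List (List Int)) : pvProcs gens c [] = c := rfl
theorem pvProcs_cons (gens c : List (List Int)) (h : List Int) (hs : List (List Int)) :
    pvProcs gens c (h :: hs) = pvProcs gens (pvProc gens c h) hs := rfl

theorem pvAdd_append (c : List (List Int)) (x : List Int) :
    ∃ e, PySem.Set.add c x = c ++ e := by
  by_cases hx : x ∈ c
  · exact ⟨[], by simp [PySem.Set.add_of_mem hx]⟩
  · exact ⟨[x], PySem.Set.add_of_not_mem hx⟩

theorem pvProc_append (l : List (List Int)) (h : List Int) :
    ∀ c, ∃ e, pvProc l c h = c ++ e := by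
  induction l with
  | nil => exact fun c => ⟨[], by simp [pvProc_nil]⟩
  | cons g gs ih =>
    intro c
    obtain ⟨e', he'⟩ := pvAdd_append c (pvCompA g h)
    obtain ⟨e, he⟩ := ih (PySem.Set.add c (pvCompA g h))
    exact ⟨e' ++ e, by rw [pvProc_cons, he, he', List.append_assoc]⟩

theorem pvProcs_append (gens : List (List Int)) (hs : List (List Int)) :
    ∀ c, ∃ e, pvProcs gens c hs = c ++ e := by
  induction hs with
  | nil => exact fun c => ⟨[], by simp [pvProcs_nil]⟩
  | cons h hs ih =>
    intro c
    obtain ⟨e', he'⟩ := pvProc_append gens h c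
    obtain ⟨e, he⟩ := ih (pvProc gens c h)
    exact ⟨e' ++ e, by rw [pvProcs_cons, he, he', List.append_assoc]⟩

theorem pvMem_proc (l : List (List Int)) (h : List Int) (c : List (List Int)) {a : List Int}
    (ha : a ∈ c) : a ∈ pvProc l c h := by
  obtain ⟨e, he⟩ := pvProc_append l h c
  rw [he]; exact List.mem_append_left _ ha

theorem pvMem_procs (gens : List (List Int)) (hs : List (List Int)) (c : List (List Int))
    {a : List Int} (ha : a ∈ c) : a ∈ pvProcs gens c hs := by
  obtain ⟨e, he⟩ := pvProcs_append gens hs c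
  rw [he]; exact List.mem_append_left _ ha

theorem pvComp_mem_proc (l : List (List Int)) (h : List Int) :
    ∀ c, ∀ g ∈ l, pvCompA g h ∈ pvProc l c h := by
  induction l with
  | nil => intro c g hg; cases hg
  | cons g0 gs ih =>
    intro c g hg
    rw [pvProc_cons]
    rcases List.mem_cons.mp hg with h1 | h1
    · subst h1; exact pvMem_proc gs h _ ((PySem.Set.mem_add _ _ _).mpr (Or.inr rfl))
    · exact ih _ g h1

theorem pvProc_of_sat (l : List (List Int)) (h : List Int) :
    ∀ c, (∀ g ∈ l, pvCompA g h ∈ c) → pvProc l c h = c := by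
  induction l with
  | nil => intro c _; rfl
  | cons g gs ih =>
    intro c hsat
    rw [pvProc_cons, PySem.Set.add_of_mem (hsat g (List.mem_cons_self ..))]
    exact ih c (fun g' hg' => hsat g' (List.mem_cons_of_mem _ hg'))

theorem pvSat_of_proc_eq (l : List (List Int)) (h : List Int) :
    ∀ c, pvProc l c h = c → ∀ g ∈ l, pvCompA g h ∈ c := by
  induction l with
  | nil => intro c _ g hg; cases hg
  | cons g0 gs ih =>
    intro c heq g hg
    rw [pvProc_cons] at heq
    obtain ⟨e', he'⟩ := pvAdd_append c (pvCompA g0 h)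
    obtain ⟨e, he⟩ := pvProc_append gs h (PySem.Set.add c (pvCompA g0 h))
    have heq2 : c ++ (e' ++ e) = c := by
      rw [← List.append_assoc, ← he', ← he]; exact heq
    have hnil : e' ++ e = [] := by
      have := congrArg List.length heq2
      simp at this
      exact List.length_eq_zero_iff.mp (by simpa using this)
    obtain ⟨he'nil, henil⟩ := List.append_eq_nil_iff.mp hnil
    have hmem : pvCompA g0 h ∈ c := by
      by_contra hnm
      rw [PySem.Set.add_of_not_mem hnm, he'nil] at he'
      have := congrArg List.length he'
      simp at this
    rcases List.mem_cons.mp hg with h1 | h1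
    · subst h1; exact hmem
    · have hadd : PySem.Set.add c (pvCompA g0 h) = c := PySem.Set.add_of_mem hmem
      rw [hadd, henil, List.append_nil] at he
      exact ih c he g h1

theorem pvProcs_of_sat (gens : List (List Int)) (hs : List (List Int)) :
    ∀ c, (∀ h ∈ hs, ∀ g ∈ gens, pvCompA g h ∈ c) → pvProcs gens c hs = c := by
  induction hs with
  | nil => intro c _; rfl
  | cons h hs ih =>
    intro c hsat
    rw [pvProcs_cons, pvProc_of_sat gens h c (hsat h (List.mem_cons_self ..))]
    exact ih c (fun h' hh' => hsat h' (List.mem_cons_of_mem _ hh'))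

theorem pvSat_of_procs_eq (gens : List (List Int)) (hs : List (List Int)) :
    ∀ c, pvProcs gens c hs = c → ∀ h ∈ hs, ∀ g ∈ gens, pvCompA g h ∈ c := by
  induction hs with
  | nil => intro c _ h hh; cases hh
  | cons h0 hs ih =>
    intro c heq h hh
    rw [pvProcs_cons] at heq
    obtain ⟨e', he'⟩ := pvProc_append gens h0 c
    obtain ⟨e, he⟩ := pvProcs_append gens hs (pvProc gens c h0)
    have heq2 : c ++ (e' ++ e) = c := by
      rw [← List.append_assoc, ← he', ← he]; exact heq
    have hnil : e' ++ e = [] := by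
      have := congrArg List.length heq2
      simp at this
      exact List.length_eq_zero_iff.mp (by simpa using this)
    obtain ⟨he'nil, henil⟩ := List.append_eq_nil_iff.mp hnil
    have hproc : pvProc gens c h0 = c := by rw [he', he'nil, List.append_nil]
    rcases List.mem_cons.mp hh with h2 | h2
    · subst h2; exact pvSat_of_proc_eq gens h c hproc
    · have hprocs : pvProcs gens c hs = c := by
        rw [← hproc]
        rw [he, hproc, henil, List.append_nil]
      exact ih c hprocs h h2

theorem pvSat_procs (gens : List (List Int)) (hs : List (List Int)) :
    ∀ c, ∀ h ∈ hs, ∀ g ∈ gens, pvCompA g h ∈ pvProcs gens c hs := by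
  induction hs with
  | nil => intro c h hh; cases hh
  | cons h0 hs ih =>
    intro c h hh g hg
    rw [pvProcs_cons]
    rcases List.mem_cons.mp hh with h1 | h1
    · subst h1
      exact pvMem_procs gens hs _ (pvComp_mem_proc gens h c g hg)
    · exact ih _ h h1 g hg

theorem pvAdd_nodup (c : List (List Int)) (x : List Int) (hc : c.Nodup) :
    (PySem.Set.add c x).Nodup := PySem.Set.nodup_add c x hc

theorem pvProc_nodup (l : List (List Int)) (h : List Int) :
    ∀ c, c.Nodup → (pvProc l c h).Nodup := by
  induction l with
  | nil => intro c hc; exact hc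
  | cons g gs ih =>
    intro c hc
    rw [pvProc_cons]
    exact ih _ (pvAdd_nodup c _ hc)

theorem pvProcs_nodup (gens : List (List Int)) (hs : List (List Int)) :
    ∀ c, c.Nodup → (pvProcs gens c hs).Nodup := by
  induction hs with
  | nil => intro c hc; exact hc
  | cons h hs ih =>
    intro c hc
    rw [pvProcs_cons]
    exact ih _ (pvProc_nodup gens h c hc)

theorem pvComp_good (gens : List (List Int)) (degree : Int) (g h : List Int)
    (hg : g ∈ gens) (hh : pvGood gens degree h) : pvGood gens degree (pvCompA g h) := by
  constructor
  · simpa [pvCompA] using hh.1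
  · intro v hv
    simp only [pvCompA, List.mem_map] at hv
    obtain ⟨i, _, hvi⟩ := hv
    by_cases hr : PySem.Raise.InRange g.length i
    · have hwg : PySem.List.pyGetD g i 0 ∈ g := PySem.List.pyGetD_mem g 0 hr
      rw [hvi] at hwg
      exact List.mem_cons_of_mem _ (List.mem_append_right _ (List.mem_flatMap.mpr ⟨g, hg, hwg⟩))
    · have hnone : PySem.List.pyGet? g i = none := (PySem.List.pyGet?_eq_none_iff g i).mpr hr
      have h0 : PySem.List.pyGetD g i 0 = 0 := PySem.List.pyGetD_of_none g i 0 hnone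
      rw [h0] at hvi
      subst hvi; exact List.mem_cons_self ..

theorem pvProc_good (gens : List (List Int)) (degree : Int) (h : List Int) :
    ∀ (l : List (List Int)), (∀ g ∈ l, g ∈ gens) →
    ∀ c, (∀ a ∈ c, pvGood gens degree a) → pvGood gens degree h →
    ∀ a ∈ pvProc l c h, pvGood gens degree a := by
  intro l
  induction l with
  | nil => intro _ c hc _ a ha; exact hc a ha
  | cons g gs ih =>
    intro hl c hc hgood a ha
    rw [pvProc_cons] at ha
    refine ih (fun g' hg' => hl g' (List.mem_cons_of_mem _ hg')) _ ?_ hgood a ha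
    intro b hb
    rcases (PySem.Set.mem_add _ _ _).mp hb with h1 | h1
    · exact hc b h1
    · subst h1; exact pvComp_good gens degree g h (hl g (List.mem_cons_self ..)) hgood

theorem pvProcs_good (gens : List (List Int)) (degree : Int) (hs : List (List Int)) :
    ∀ c, (∀ a ∈ c, pvGood gens degree a) → (∀ h ∈ hs, pvGood gens degree h) →
    ∀ a ∈ pvProcs gens c hs, pvGood gens degree a := by
  induction hs with
  | nil => intro c hc _ a ha; exact hc a ha
  | cons h hs ih =>
    intro c hc hhs a ha
    rw [pvProcs_cons] at ha
    refine ih _ (pvProc_good gens degree h gens (fun _ hg => hg) c hc (hhs h (List.mem_cons_self ..))) (fun h' hh' => hhs h' (List.mem_cons_of_mem _ hh')) a ha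

-- all lists of a given length over an alphabet, for the counting argument
def pvAll : Nat → List Int → List (List Int)
  | 0, _ => [[]]
  | n + 1, s => s.flatMap (fun a => (pvAll n s).map (a :: ·))

theorem pvMem_pvAll (s : List Int) : ∀ (n : Nat) (l : List Int),
    l.length = n → (∀ v ∈ l, v ∈ s) → l ∈ pvAll n s := by
  intro n
  induction n with
  | zero => intro l hl _; simp [pvAll, List.length_eq_zero_iff.mp hl]
  | succ n ih =>
    intro l hl hv
    cases l with
    | nil => simp at hl
    | cons a l =>
      simp only [pvAll, List.mem_flatMap, List.mem_map]
      exact ⟨a, hv a (List.mem_cons_self ..),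
        l, ih l (by simpa using hl) (fun v hv' => hv v (List.mem_cons_of_mem _ hv')), rfl⟩

theorem pvLength_pvAll (s : List Int) : ∀ (n : Nat), (pvAll n s).length = s.length ^ n := by
  intro n
  induction n with
  | zero => simp [pvAll]
  | succ n ih =>
    simp only [pvAll, List.length_flatMap, List.length_map]
    rw [List.map_const', List.sum_replicate, smul_eq_mul, ih]
    ring

theorem pvNodup_length_le (c l : List (List Int)) (hc : c.Nodup) (hsub : ∀ a ∈ c, a ∈ l) :
    c.length ≤ l.length := by
  calc c.length = c.toFinset.card := (List.toFinset_card_of_nodup hc).symm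
    _ ≤ l.toFinset.card := Finset.card_le_card (by
        intro a ha
        rw [List.mem_toFinset] at ha ⊢
        exact hsub a ha)
    _ ≤ l.length := List.toFinset_card_le l

theorem pvCount_bound (gens : List (List Int)) (degree : Int) (c : List (List Int))
    (hc : c.Nodup) (hg : ∀ a ∈ c, pvGood gens degree a) :
    c.length ≤ pvBound gens degree := by
  have := pvNodup_length_le c (pvAll degree.toNat (pvSigma gens degree)) hc
    (fun a ha => pvMem_pvAll _ _ a (hg a ha).1 (hg a ha).2)
  rwa [pvLength_pvAll] at this

theorem pvDrop_app (c e : List (List Int)) : (c ++ e).drop c.length = e := List.drop_left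

-- A's inner for-loop over gens, as a pair fold, produces (pvProc, queue ++ the new elements)
theorem pvInnerA (h : List Int) : ∀ (l : List (List Int)) (c q : List (List Int)),
    l.foldl (fun (st : List (List Int) × List (List Int)) g =>
        let comp := pvCompA g h
        if PySem.Set.contains st.1 comp then st
        else (PySem.Set.add st.1 comp, st.2 ++ [comp])) (c, q)
      = (pvProc l c h, q ++ (pvProc l c h).drop c.length) := by
  intro l
  induction l with
  | nil => intro c q; simp [pvProc_nil, List.drop_length]
  | cons g gs ih =>
    intro c q
    rw [List.foldl_cons, pvProc_cons]
    by_cases hmem : pvCompA g h ∈ c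
    · have hcont : PySem.Set.contains c (pvCompA g h) = true := by
        simpa [PySem.Set.contains] using hmem
      simp only [hcont, if_pos]
      rw [ih c q, PySem.Set.add_of_mem hmem]
    · have hcont : PySem.Set.contains c (pvCompA g h) = false := by
        simpa [PySem.Set.contains] using hmem
      simp only [hcont, Bool.false_eq_true, if_neg, not_false_iff]
      rw [ih (PySem.Set.add c (pvCompA g h)) (q ++ [pvCompA g h])]
      rw [PySem.Set.add_of_not_mem hmem]
      obtain ⟨e, he⟩ := pvProc_append gs h (c ++ [pvCompA g h])
      rw [he]
      have h1 : ((c ++ [pvCompA g h]) ++ e).drop (c ++ [pvCompA g h]).length = e :=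
        pvDrop_app _ _
      have h2 : ((c ++ [pvCompA g h]) ++ e).drop c.length = [pvCompA g h] ++ e := by
        rw [List.append_assoc]; exact pvDrop_app _ _
      rw [h1, h2]
      simp [List.append_assoc]

theorem pvLoopA_cons (gens : List (List Int)) (fuel : Nat) (c : List (List Int)) (h : List Int)
    (q : List (List Int)) :
    pvLoopA gens (fuel + 1) c (h :: q)
      = pvLoopA gens fuel (pvProc gens c h) (q ++ (pvProc gens c h).drop c.length) := by
  show pvLoopA gens fuel (gens.foldl _ (c, q)).1 (gens.foldl _ (c, q)).2 = _
  rw [pvInnerA h gens c q]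

theorem pvLoopA_drain (gens : List (List Int)) : ∀ (q : List (List Int)) (c : List (List Int)) (n : Nat),
    (∀ h ∈ q, ∀ g ∈ gens, pvCompA g h ∈ c) → q.length ≤ n → pvLoopA gens n c q = c := by
  intro q
  induction q with
  | nil => intro c n _ _; cases n <;> rfl
  | cons h q ih =>
    intro c n hsat hn
    cases n with
    | zero => simp at hn
    | succ n =>
      rw [pvLoopA_cons, pvProc_of_sat gens h c (hsat h (List.mem_cons_self ..))]
      rw [List.drop_length, List.append_nil]
      exact ih c n (fun h' hh' => hsat h' (List.mem_cons_of_mem _ hh')) (by simpa using hn)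

theorem pvLoopA_procs (gens : List (List Int)) : ∀ (q r c : List (List Int)) (n : Nat),
    pvLoopA gens (q.length + n) c (q ++ r)
      = pvLoopA gens n (pvProcs gens c q) (r ++ (pvProcs gens c q).drop c.length) := by
  intro q
  induction q with
  | nil => intro r c n; simp [pvProcs_nil, List.drop_length]
  | cons h q ih =>
    intro r c n
    have hlen : (h :: q).length + n = (q.length + n) + 1 := by simp; omega
    rw [hlen, List.cons_append, pvLoopA_cons]
    obtain ⟨e1, he1⟩ := pvProc_append gens h c
    obtain ⟨e2, he2⟩ := pvProcs_append gens q (pvProc gens c h)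
    have hq : (q ++ r) ++ (pvProc gens c h).drop c.length = q ++ (r ++ (pvProc gens c h).drop c.length) := by
      simp [List.append_assoc]
    rw [hq, ih (r ++ (pvProc gens c h).drop c.length) (pvProc gens c h) n, pvProcs_cons]
    congr 1
    rw [he2, he1]
    have h1 : ((c ++ e1) ++ e2).drop (c ++ e1).length = e2 := pvDrop_app _ _
    have h2 : ((c ++ e1) ++ e2).drop c.length = e1 ++ e2 := by
      rw [List.append_assoc]; exact pvDrop_app _ _
    rw [pvDrop_app c e1, h1, h2, List.append_assoc]

theorem pvMain (gens : List (List Int)) (degree : Int) : ∀ (m : Nat) (c d q : List (List Int)) (n : Nat),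
    c = d ++ q →
    (∀ h ∈ d, ∀ g ∈ gens, pvCompA g h ∈ c) →
    c.Nodup →
    (∀ h ∈ c, pvGood gens degree h) →
    q.length + pvBound gens degree + 1 ≤ n + c.length →
    pvBound gens degree + 1 ≤ m + c.length →
    pvLoopA gens n c q = pvFixB gens m c := by
  intro m
  induction m with
  | zero =>
    intro c d q n _ _ hnd hgood _ hm
    have := pvCount_bound gens degree c hnd hgood
    omega
  | succ m ih =>
    intro c d q n hc hsat hnd hgood hn hm
    have hclen : c.length ≤ pvBound gens degree := pvCount_bound gens degree c hnd hgood
    have hpass : pvPassB gens c = pvProcs gens c q := by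
      have h1 : pvPassB gens c = pvProcs gens c c := rfl
      have h2 : pvProcs gens c c = pvProcs gens c (d ++ q) := congrArg (pvProcs gens c) hc
      have h3 : pvProcs gens c (d ++ q) = pvProcs gens (pvProcs gens c d) q := List.foldl_append
      rw [h1, h2, h3, pvProcs_of_sat gens d c hsat]
    obtain ⟨ext, hext⟩ := pvProcs_append gens q c
    have hfix : pvFixB gens (m + 1) c
        = if pvProcs gens c q = c then c else pvFixB gens m (pvProcs gens c q) := by
      show (if pvPassB gens c = c then c else pvFixB gens m (pvPassB gens c)) = _
      rw [hpass]
    by_cases hstop : pvProcs gens c q = c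
    · rw [hfix, if_pos hstop]
      exact pvLoopA_drain gens q c n (pvSat_of_procs_eq gens q c hstop) (by omega)
    · rw [hfix, if_neg hstop]
      have hextne : ext ≠ [] := by
        intro h0; rw [h0, List.append_nil] at hext; exact hstop hext
      have hextlen : 1 ≤ ext.length := by
        cases ext with
        | nil => exact absurd rfl hextne
        | cons _ _ => simp
      have hqn : q.length ≤ n := by omega
      have hns : n = q.length + (n - q.length) := by omega
      rw [hns]
      have hqnil : q = q ++ [] := by simp
      rw [show pvLoopA gens (q.length + (n - q.length)) c q
            = pvLoopA gens (q.length + (n - q.length)) c (q ++ []) from by rw [← hqnil]]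
      rw [pvLoopA_procs gens q [] c (n - q.length), List.nil_append]
      have hdrop : (pvProcs gens c q).drop c.length = ext := by
        rw [hext]; simp
      rw [hdrop]
      have hcQlen : (pvProcs gens c q).length = c.length + ext.length := by
        rw [hext]; simp
      refine ih (pvProcs gens c q) c ext (n - q.length) hext ?_ ?_ ?_ ?_ ?_
      · intro h hh g hg
        have : h ∈ d ++ q := by rw [← hc]; exact hh
        rcases List.mem_append.mp this with h1 | h1
        · exact pvMem_procs gens q c (hsat h h1 g hg)
        · exact pvSat_procs gens q c h h1 g hg
      · exact pvProcs_nodup gens q c hnd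
      · refine pvProcs_good gens degree q c hgood ?_
        intro h hh
        exact hgood h (by rw [hc]; exact List.mem_append_right _ hh)
      · omega
      · omega

theorem pvOfList_singleton (x : List Int) : PySem.Set.ofList [x] = [x] :=
  PySem.Set.ofList_eq_self_of_nodup [x] (by simp)

theorem pvGood_identity (gens : List (List Int)) (degree : Int) :
    pvGood gens degree (PySem.List.pyRange 0 degree 1) := by
  constructor
  · rw [PySem.List.length_pyRange_one]; simp
  · intro v hv
    exact List.mem_cons_of_mem _ (List.mem_append_left _ hv)

theorem pvTop (gens : List (List Int)) (degree : Int) :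
    closure_generated_by gens degree = closure_generated_by_alt gens degree := by
  show pvLoopA gens ((0 :: PySem.List.pyRange 0 degree 1 ++ gens.flatMap id).length ^ degree.toNat + 1)
        (PySem.Set.ofList [PySem.List.pyRange 0 degree 1]) [PySem.List.pyRange 0 degree 1]
      = pvFixB gens ((0 :: PySem.List.pyRange 0 degree 1 ++ gens.flatMap id).length ^ degree.toNat + 1)
        (PySem.Set.ofList [PySem.List.pyRange 0 degree 1])
  rw [pvOfList_singleton]
  have hb : (0 :: PySem.List.pyRange 0 degree 1 ++ gens.flatMap id).length ^ degree.toNat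
      = pvBound gens degree := rfl
  rw [hb]
  refine pvMain gens degree (pvBound gens degree + 1) [PySem.List.pyRange 0 degree 1] []
    [PySem.List.pyRange 0 degree 1] (pvBound gens degree + 1) (by simp) (by simp) (by simp) ?_ (by omega) (by omega)
  intro h hh
  rw [List.mem_singleton] at hh
  subst hh
  exact pvGood_identity gens degree

-- ===== VERDICT (by name: the statement is the Claim_ definition above) =====
theorem closure_generated_by_spec : Claim_equal_closure_generated_by := by
  intro gens degree _ _
  unfold Spec_closure_generated_by
  exact pvTop gens degree
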